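-- pv_equiv track=rewrite | github.com/MoaliMkh/C-Minus-Compiler | DS.py | Second_task
-- ===== SOURCE A (Python) =====
-- def Second_task(list, k):
--     result = 0
--     for i in range(len(list)):
--         summ = 0
--         for j in range(i, len(list)):
--             summ += list[j]
--             if summ <= k:
--                 result += 1
--             else:
--                 break
--     return result
-- ===== SOURCE B (Python) =====
-- def Second_task(list, k):
--     n = len(list)
--     # prefix sums: P[t] = list[0] + ... + list[t-1]
--     P = [0] * (n + 1)
--     s = 0
--     for idx in range(n):
--         s += list[idx]
--         P[idx + 1] = s
--     # sparse table of range maxima over P: levels[l][t] = max(P[t : t + 2**l])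
--     levels = [P[:]]
--     size = 1
--     while 2 * size <= n + 1:
--         prev = levels[-1]
--         cur = [max(prev[t], prev[t + size]) for t in range(len(prev) - size)]
--         levels.append(cur)
--         size *= 2
--
--     def qmax(a, b):  # max(P[a:b]), requires a < b
--         l = (b - a).bit_length() - 1
--         row = levels[l]
--         return max(row[a], row[b - (1 << l)])
--
--     total = 0
--     for i in range(n):
--         bound = P[i] + k
--         # largest j in [i, n] with max(P[i+1 : j+1]) <= bound, by binary search
--         lo, hi = i, n + 1
--         while hi - lo > 1:
--             mid = (lo + hi) // 2
--             if qmax(i + 1, mid + 1) <= bound: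
--                 lo = mid
--             else:
--                 hi = mid
--         total += lo - i
--     return total
-- ===== Notes on version B (the rewrite author's own statement) =====
-- stated objective: faster
-- what changed: Replaces the quadratic restart-the-sum inner loop by prefix sums plus a sparse table of range maxima, finding each start's first threshold crossing by binary search on the monotone window-maximum predicate.
import Mathlib
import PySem

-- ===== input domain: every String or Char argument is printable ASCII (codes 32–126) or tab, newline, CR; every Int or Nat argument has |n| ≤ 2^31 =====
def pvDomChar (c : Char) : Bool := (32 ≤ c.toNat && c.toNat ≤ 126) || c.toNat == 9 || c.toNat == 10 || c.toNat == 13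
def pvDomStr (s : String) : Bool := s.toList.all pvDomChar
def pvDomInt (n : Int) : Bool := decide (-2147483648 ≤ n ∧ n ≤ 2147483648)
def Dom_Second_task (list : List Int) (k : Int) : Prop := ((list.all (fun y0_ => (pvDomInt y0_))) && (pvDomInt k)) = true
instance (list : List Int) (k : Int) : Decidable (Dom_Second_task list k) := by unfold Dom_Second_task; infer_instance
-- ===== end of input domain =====

-- B replaces A's quadratic restart-the-sum scan by prefix sums + a sparse table of range
-- maxima + per-start binary search (objective: faster, O(n log n) vs O(n^2)).

-- ===== PORT A =====
-- inner 'for j in range(i, len(list)): summ += list[j]; if summ <= k: result += 1 else: break'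
def aLoop (list : List Int) (k : Int) : List Int → Int → Int → Int
  | [], _summ, result => result
  | j :: rest, summ, result =>
    let summ' := summ + PySem.List.pyGetD list j 0
    if summ' ≤ k then aLoop list k rest summ' (result + 1) else result

def Second_task (list : List Int) (k : Int) : Int :=
  (PySem.List.pyRange 0 (list.length : Int) 1).foldl
    (fun result i => aLoop list k (PySem.List.pyRange i (list.length : Int) 1) 0 result) 0

-- ===== PORT B =====
-- P = [0]*(n+1); s = 0; for idx in range(n): s += list[idx]; P[idx+1] = s
def bBuildP (list : List Int) : List Int :=
  ((PySem.List.pyRange 0 (list.length : Int) 1).foldl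
    (fun (sp : Int × List Int) idx =>
      let s := sp.1 + PySem.List.pyGetD list idx 0
      (s, PySem.List.pySetD sp.2 (idx + 1) s))
    (0, List.replicate (list.length + 1) 0)).2

-- 'while 2*size <= n+1: cur = [max(prev[t], prev[t+size]) for t in range(len(prev)-size)];
--  levels.append(cur); size *= 2'  (fuel only makes the while loop structural: n+1
--  iterations always suffice because size doubles from 1)
def bLevels (n : Nat) : Nat → List (List Int) → Nat → List (List Int)
  | 0, levels, _ => levels
  | fuel + 1, levels, size =>
    if 2 * size ≤ n + 1 then
      let prev := PySem.List.pyGetD levels (-1) []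
      let cur := (PySem.List.pyRange 0 ((prev.length : Int) - (size : Int)) 1).map
        (fun t => max (PySem.List.pyGetD prev t 0) (PySem.List.pyGetD prev (t + (size : Int)) 0))
      bLevels n fuel (levels ++ [cur]) (2 * size)
    else levels

-- qmax(a, b): l = (b-a).bit_length()-1; row = levels[l]; max(row[a], row[b - (1 << l)])
def bQmax (levels : List (List Int)) (a b : Int) : Int :=
  let l := PySem.Int.bitLength (b - a) - 1
  let row := PySem.List.pyGetD levels (l : Int) []
  max (PySem.List.pyGetD row a 0) (PySem.List.pyGetD row (b - ((1 : Int) <<< (l : Int))) 0)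

-- 'lo, hi = i, n+1; while hi - lo > 1: mid = (lo+hi)//2;
--  if qmax(i+1, mid+1) <= bound: lo = mid else: hi = mid'  (fuel n+2 bounds the hi-lo gap)
def bSearch (levels : List (List Int)) (bound i : Int) : Nat → Int → Int → Int
  | 0, lo, _ => lo
  | fuel + 1, lo, hi =>
    if hi - lo > 1 then
      let mid := PySem.Int.floordiv (lo + hi) 2
      if bQmax levels (i + 1) (mid + 1) ≤ bound then bSearch levels bound i fuel mid hi
      else bSearch levels bound i fuel lo mid
    else lo

def Second_task_alt (list : List Int) (k : Int) : Int :=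
  let n := list.length
  let P := bBuildP list
  let levels := bLevels n (n + 1) [P] 1
  (PySem.List.pyRange 0 (n : Int) 1).foldl
    (fun total i =>
      let bound := PySem.List.pyGetD P i 0 + k
      let lo := bSearch levels bound i (n + 2) i ((n : Int) + 1)
      total + (lo - i)) 0

-- ===== PRECONDITION & SPEC =====
def Spec_Second_task (list : List Int) (k : Int) (out : Int) : Prop := out = Second_task_alt list k
instance (list : List Int) (k : Int) (out : Int) : Decidable (Spec_Second_task list k out) := by unfold Spec_Second_task; infer_instance

-- ===== CLAIM (what is proved, stated in full; the proofs are below) =====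
def Claim_equal_Second_task : Prop := ∀ (list : List Int) (k : Int), Dom_Second_task list k → Spec_Second_task list k (Second_task list k)

-- ===== LEMMAS AND PROOFS =====

-- length of the longest prefix of xs whose running sums (from s) stay ≤ k; both programs compute its total
def cnt (k : Int) : List Int → Int → Int
  | [], _ => 0
  | x :: xs, s => if s + x ≤ k then cnt k xs (s + x) + 1 else 0

theorem aLoop_eq_cnt (list : List Int) (k : Int) :
    ∀ (xs : List Int) (j : Nat), list.drop j = xs → ∀ (s r : Int),
      aLoop list k (PySem.List.pyRange (j : Int) (list.length : Int) 1) s r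
        = r + cnt k xs s := by
  intro xs
  induction xs with
  | nil =>
    intro j hd s r
    have hlen : list.length ≤ j := by
      by_contra h
      have := List.drop_eq_nil_iff.mp hd
      omega
    rw [PySem.List.pyRange_one_eq_nil (by exact_mod_cast hlen)]
    simp [aLoop, cnt]
  | cons x rest ih =>
    intro j hd s r
    have hj : j < list.length := by
      by_contra h
      have : list.drop j = [] := List.drop_eq_nil_iff.mpr (by omega)
      rw [this] at hd; simp at hd
    have hget : list[j]? = some x := by
      have := congrArg (fun l => l[0]?) hd
      simpa [List.getElem?_drop] using this
    have hgetD : PySem.List.pyGetD list (j : Int) 0 = x := by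
      rw [PySem.List.pyGetD_natCast]
      simp [List.getD, hget]
    have hrest : list.drop (j + 1) = rest := by
      rw [← List.tail_drop, hd]; rfl
    have hcast : (j:Int) < (list.length:Int) := by omega
    rw [PySem.List.pyRange_one_cons hcast]
    show aLoop list k ((j:Int) :: PySem.List.pyRange ((j:Int)+1) (list.length:Int) 1) s r = _
    simp only [aLoop, hgetD, cnt]
    by_cases hc : s + x ≤ k
    · simp only [hc, if_pos]
      have : ((j:Int) + 1) = ((j+1 : Nat) : Int) := by push_cast; ring
      rw [this, ih (j+1) hrest (s+x) (r+1)]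
      ring
    · simp [hc]

theorem Second_task_eq_sum (list : List Int) (k : Int) :
    Second_task list k
      = (PySem.List.pyRange 0 (list.length : Int) 1).foldl
          (fun r i => r + cnt k (list.drop i.toNat) 0) 0 := by
  unfold Second_task
  apply PySem.List.foldl_congr_mem
  intro acc i hi
  have h0 : 0 ≤ i := ((PySem.List.mem_pyRange_one).mp hi).1
  have : (i.toNat : Int) = i := Int.toNat_of_nonneg h0
  rw [← this]
  exact aLoop_eq_cnt list k (list.drop i.toNat) i.toNat rfl 0 acc

theorem bBuildP_inv (list : List Int) :
    ∀ m : Nat, m ≤ list.length →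
      (let sp := (PySem.List.pyRange 0 (m : Int) 1).foldl
        (fun (sp : Int × List Int) idx =>
          let s := sp.1 + PySem.List.pyGetD list idx 0
          (s, PySem.List.pySetD sp.2 (idx + 1) s))
        (0, List.replicate (list.length + 1) 0)
       sp.1 = (list.take m).sum ∧ sp.2.length = list.length + 1 ∧
         ∀ t : Nat, t ≤ list.length →
           sp.2.getD t 0 = if t ≤ m then (list.take t).sum else 0) := by
  intro m
  induction m with
  | zero =>
    intro _
    have h0 : PySem.List.pyRange 0 ((0:Nat):Int) 1 = [] :=
      PySem.List.pyRange_one_eq_nil (by omega)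
    rw [h0]
    refine ⟨by simp, by simp, ?_⟩
    intro t ht
    simp only [List.foldl_nil]
    split
    · next h => interval_cases t; simp
    · simp [List.getD]
  | succ m ih =>
    intro hm
    have hm' : m ≤ list.length := by omega
    obtain ⟨h1, h2, h3⟩ := ih hm'
    have hrg : PySem.List.pyRange 0 ((m+1 : Nat) : Int) 1
        = PySem.List.pyRange 0 (m : Int) 1 ++ [(m : Int)] := by
      have : ((m+1 : Nat) : Int) = (m : Int) + 1 := by push_cast; ring
      rw [this, PySem.List.pyRange_one_succ_right (by omega)]
    rw [hrg, List.foldl_append]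
    simp only [List.foldl_cons, List.foldl_nil]
    set sp := (PySem.List.pyRange 0 (m : Int) 1).foldl
        (fun (sp : Int × List Int) idx =>
          let s := sp.1 + PySem.List.pyGetD list idx 0
          (s, PySem.List.pySetD sp.2 (idx + 1) s))
        (0, List.replicate (list.length + 1) 0) with hsp
    have hget : PySem.List.pyGetD list (m : Int) 0 = list.getD m 0 := PySem.List.pyGetD_natCast _ _ _
    have hgm : list.getD m 0 = list[m]'(by omega) := List.getD_eq_getElem list 0 (by omega)
    refine ⟨?_, ?_, ?_⟩
    · show sp.1 + PySem.List.pyGetD list (m : Int) 0 = _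
      rw [hget, hgm, h1, List.sum_take_succ _ _ (by omega)]
    · show (PySem.List.pySetD sp.2 ((m:Int) + 1) _).length = _
      have hc : ((m:Int) + 1) = ((m+1 : Nat) : Int) := by push_cast; ring
      rw [hc, PySem.List.pySetD_natCast, List.length_set, h2]
    · intro t ht
      show (PySem.List.pySetD sp.2 ((m:Int) + 1) (sp.1 + PySem.List.pyGetD list (m:Int) 0)).getD t 0 = _
      have hc : ((m:Int) + 1) = ((m+1 : Nat) : Int) := by push_cast; ring
      rw [hc, PySem.List.pySetD_natCast]
      by_cases he : t = m + 1
      · subst he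
        rw [List.getD_eq_getElem?_getD, List.getElem?_set_self (by rw [h2]; omega)]
        rw [hget, hgm, h1, List.sum_take_succ _ _ (by omega)]
        simp
      · rw [List.getD_eq_getElem?_getD, List.getElem?_set_ne (by omega),
            ← List.getD_eq_getElem?_getD, h3 t ht]
        have hiff : t ≤ m ↔ t ≤ m + 1 := by omega
        simp [hiff]

theorem bBuildP_length (list : List Int) : (bBuildP list).length = list.length + 1 := by
  have h := bBuildP_inv list list.length le_rfl
  exact h.2.1

theorem bBuildP_getD (list : List Int) (t : Nat) (ht : t ≤ list.length) :
    (bBuildP list).getD t 0 = (list.take t).sum := by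
  have h := bBuildP_inv list list.length le_rfl
  have := h.2.2 t ht
  simpa [bBuildP, ht] using this

-- sparse-table row for window width w: entry t bounds the maximum of PS[t..t+w-1]
def RowOK (PS : List Int) (n w : Nat) (row : List Int) : Prop :=
  row.length = n + 2 - w ∧
    ∀ t : Nat, t + w ≤ n + 1 → ∀ X : Int,
      (row.getD t 0 ≤ X ↔ ∀ u : Nat, u < w → PS.getD (t + u) 0 ≤ X)

def LevOK (PS : List Int) (n : Nat) (levels : List (List Int)) : Prop :=
  ∀ l : Nat, 2 ^ l ≤ n + 1 → RowOK PS n (2 ^ l) (levels.getD l [])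

theorem bLevels_ok (PS : List Int) (n : Nat) :
    ∀ (fuel : Nat) (levels : List (List Int)) (L : Nat),
      levels.length = L + 1 → 2 ^ L ≤ n + 1 →
      (∀ l : Nat, l ≤ L → RowOK PS n (2 ^ l) (levels.getD l [])) →
      n + 1 ≤ fuel + 2 ^ L →
      LevOK PS n (bLevels n fuel levels (2 ^ L)) := by
  intro fuel
  induction fuel with
  | zero =>
    intro levels L hlen hL hrows hfuel l hl
    have : l ≤ L := by
      by_contra h
      have : 2 ^ (L + 1) ≤ 2 ^ l := Nat.pow_le_pow_right (by omega) (by omega)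
      have : 2 ^ L < 2 ^ (L + 1) := Nat.pow_lt_pow_right (by omega) (by omega)
      omega
    exact hrows l this
  | succ fuel ih =>
    intro levels L hlen hL hrows hfuel
    show LevOK PS n (bLevels n (fuel + 1) levels (2 ^ L))
    rw [bLevels]
    by_cases hc : 2 * 2 ^ L ≤ n + 1
    · rw [if_pos hc]
      have hne : levels ≠ [] := by
        intro h; rw [h] at hlen; simp at hlen
      have hprev : PySem.List.pyGetD levels (-1) [] = levels.getD L [] := by
        rw [PySem.List.pyGetD_neg_one levels [] hne, List.getLast_eq_getElem,
            List.getD_eq_getElem _ _ (by omega)]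
        congr 1
        omega
      have hrowL := hrows L le_rfl
      rw [← hprev] at hrowL
      obtain ⟨hplen, hpok⟩ := hrowL
      set prev := PySem.List.pyGetD levels (-1) [] with hprevdef
      -- the new row
      set cur := (PySem.List.pyRange 0 ((prev.length : Int) - ((2^L : Nat) : Int)) 1).map
        (fun t => max (PySem.List.pyGetD prev t 0) (PySem.List.pyGetD prev (t + ((2^L : Nat) : Int)) 0)) with hcur
      have h1L : (1:Nat) ≤ 2 ^ L := Nat.one_le_two_pow
      have hbnd : ((prev.length : Int) - ((2^L : Nat) : Int)) = ((n + 2 - 2 * 2 ^ L : Nat) : Int) := by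
        rw [hplen]; omega
      have hcurlen : cur.length = n + 2 - 2 * 2 ^ L := by
        rw [hcur, List.length_map, hbnd, PySem.List.length_pyRange_one]
        omega
      have hcurget : ∀ t : Nat, t < n + 2 - 2 * 2 ^ L →
          cur.getD t 0 = max (prev.getD t 0) (prev.getD (t + 2 ^ L) 0) := by
        intro t htb
        have hq : (PySem.List.pyRange 0 ((prev.length : Int) - ((2^L : Nat) : Int)) 1)[t]? = some ((t : Nat) : Int) := by
          rw [PySem.List.getElem?_pyRange_one, if_pos (by rw [hbnd]; omega)]
          simp
        rw [List.getD_eq_getElem?_getD, hcur, List.getElem?_map, hq]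
        simp only [Option.map_some, Option.getD_some]
        rw [PySem.List.pyGetD_natCast]
        have e2 : ((t : Nat) : Int) + ((2^L : Nat) : Int) = ((t + 2^L : Nat) : Int) := by push_cast; ring
        rw [e2, PySem.List.pyGetD_natCast]
      have hcurok : RowOK PS n (2 ^ (L + 1)) cur := by
        constructor
        · rw [hcurlen, pow_succ]; ring_nf
        · intro t htw X
          have htb : t < n + 2 - 2 * 2 ^ L := by
            rw [pow_succ] at htw; omega
          rw [hcurget t htb, max_le_iff]
          rw [hpok t (by omega) X, hpok (t + 2 ^ L) (by omega) X]
          constructor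
          · rintro ⟨ha, hb⟩ u hu
            rw [pow_succ] at hu
            by_cases hus : u < 2 ^ L
            · exact ha u hus
            · have : t + u = (t + 2 ^ L) + (u - 2 ^ L) := by omega
              rw [this]
              exact hb (u - 2 ^ L) (by omega)
          · intro h
            refine ⟨fun u hu => h u (by rw [pow_succ]; omega),
                    fun u hu => ?_⟩
            have : (t + 2 ^ L) + u = t + (2 ^ L + u) := by omega
            rw [this]
            exact h (2 ^ L + u) (by rw [pow_succ]; omega)
      have hstep : (2 * 2 ^ L) = 2 ^ (L + 1) := by rw [pow_succ]; ring
      rw [hstep]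
      apply ih (levels ++ [cur]) (L + 1)
      · simp [hlen]
      · omega
      · intro l hl
        by_cases hle : l ≤ L
        · rw [List.getD_eq_getElem?_getD, List.getElem?_append_left (by omega),
              ← List.getD_eq_getElem?_getD]
          exact hrows l hle
        · have : l = L + 1 := by omega
          subst this
          have : (levels ++ [cur]).getD (L+1) [] = cur := by
            rw [List.getD_eq_getElem?_getD, List.getElem?_append_right (by omega)]
            simp [hlen]
          rw [this]
          exact hcurok
      · omega
    · rw [if_neg hc]
      intro l hl
      have : l ≤ L := by
        by_contra h
        have h1 : 2 ^ (L + 1) ≤ 2 ^ l := Nat.pow_le_pow_right (by omega) (by omega)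
        rw [pow_succ] at h1
        omega
      exact hrows l this

theorem bQmax_iff (PS : List Int) (n : Nat) (levels : List (List Int))
    (hlev : LevOK PS n levels) (a b : Nat) (hab : a < b) (hb : b ≤ n + 1) (X : Int) :
    (bQmax levels (a : Int) (b : Int) ≤ X ↔
      ∀ t : Nat, a ≤ t → t < b → PS.getD t 0 ≤ X) := by
  have hd : ((b : Int) - (a : Int)) = ((b - a : Nat) : Int) := by omega
  set d := b - a with hddef
  have hd1 : 1 ≤ d := by omega
  have hbl : PySem.Int.bitLength ((d : Nat) : Int) ≥ 1 := by
    by_contra h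
    have := PySem.Int.lt_two_pow_bitLength ((d : Nat) : Int)
    have h0 : PySem.Int.bitLength ((d : Nat) : Int) = 0 := by omega
    rw [h0] at this
    simp at this
    omega
  set l := PySem.Int.bitLength ((d : Nat) : Int) - 1 with hldef
  have hlow : 2 ^ l ≤ d := by
    have := PySem.Int.two_pow_bitLength_le ((d : Nat) : Int) (by simp; omega)
    simpa using this
  have hhigh : d < 2 ^ (l + 1) := by
    have := PySem.Int.lt_two_pow_bitLength ((d : Nat) : Int)
    have hl1 : l + 1 = PySem.Int.bitLength ((d : Nat) : Int) := by omega
    rw [hl1]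
    simpa using this
  have hwn : 2 ^ l ≤ n + 1 := by omega
  obtain ⟨hrlen, hrok⟩ := hlev l hwn
  simp only [bQmax]
  rw [hd, ← hldef]
  rw [Int.one_shiftLeft l]
  rw [PySem.List.pyGetD_natCast levels]
  rw [show ((b : Int) - ((2^l : Nat) : Int)) = ((b - 2^l : Nat) : Int) by omega]
  rw [PySem.List.pyGetD_natCast, PySem.List.pyGetD_natCast]
  rw [max_le_iff]
  rw [hrok a (by omega) X, hrok (b - 2^l) (by omega) X]
  constructor
  · rintro ⟨h1, h2⟩ t h3 h4
    by_cases ht : t < a + 2 ^ l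
    · have e : t = a + (t - a) := by omega
      rw [e]
      exact h1 (t - a) (by omega)
    · have e : t = (b - 2 ^ l) + (t - (b - 2 ^ l)) := by omega
      rw [e]
      exact h2 (t - (b - 2 ^ l)) (by omega)
  · intro h
    constructor
    · intro u hu
      exact h (a + u) (by omega) (by omega)
    · intro u hu
      exact h (b - 2 ^ l + u) (by omega) (by omega)

-- all prefix sums PS[t] for i < t ≤ j stay ≤ bound
def GoodUpTo (PS : List Int) (bound : Int) (iN : Nat) (j : Int) : Prop :=
  ∀ t : Nat, iN < t → (t : Int) ≤ j → PS.getD t 0 ≤ bound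

theorem bSearch_spec (PS : List Int) (n : Nat) (levels : List (List Int))
    (hlev : LevOK PS n levels) (iN : Nat) (_hin : iN < n) (bound : Int) :
    ∀ (fuel : Nat) (lo hi : Int), (iN : Int) ≤ lo → lo < hi → hi ≤ (n : Int) + 1 →
      (hi - lo).toNat ≤ fuel →
      GoodUpTo PS bound iN lo → (hi = (n : Int) + 1 ∨ ¬ GoodUpTo PS bound iN hi) →
      (iN : Int) ≤ bSearch levels bound (iN : Int) fuel lo hi ∧
      bSearch levels bound (iN : Int) fuel lo hi ≤ (n : Int) ∧
      GoodUpTo PS bound iN (bSearch levels bound (iN : Int) fuel lo hi) ∧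
      (bSearch levels bound (iN : Int) fuel lo hi = (n : Int) ∨
        ¬ GoodUpTo PS bound iN (bSearch levels bound (iN : Int) fuel lo hi + 1)) := by
  intro fuel
  induction fuel with
  | zero =>
    intro lo hi h1 h2 h3 h4 h5 h6
    exfalso; omega
  | succ fuel ih =>
    intro lo hi h1 h2 h3 h4 h5 h6
    rw [bSearch]
    by_cases hbig : hi - lo > 1
    · rw [if_pos hbig]
      set mid := PySem.Int.floordiv (lo + hi) 2 with hmid
      have hmb : lo + 1 ≤ mid ∧ mid ≤ hi - 1 := by
        have := PySem.Int.floordiv_two_mid_bounds (lo := lo + 1) (hi := hi - 1) (by omega)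
        constructor
        · calc lo + 1 ≤ PySem.Int.floordiv ((lo+1) + (hi-1)) 2 := this.1
            _ = mid := by rw [hmid]; ring_nf
        · calc mid = PySem.Int.floordiv ((lo+1) + (hi-1)) 2 := by rw [hmid]; ring_nf
            _ ≤ hi - 1 := this.2
      set midN := mid.toNat with hmidN
      have hmidc : (midN : Int) = mid := Int.toNat_of_nonneg (by omega)
      have hcond : (bQmax levels ((iN : Int) + 1) (mid + 1) ≤ bound) ↔ GoodUpTo PS bound iN mid := by
        have e1 : ((iN : Int) + 1) = ((iN + 1 : Nat) : Int) := by push_cast; ring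
        have e2 : (mid + 1) = ((midN + 1 : Nat) : Int) := by push_cast; omega
        rw [e1, e2, bQmax_iff PS n levels hlev (iN+1) (midN+1) (by omega) (by omega)]
        constructor
        · intro h t ht1 ht2
          exact h t (by omega) (by omega)
        · intro h t ht1 ht2
          exact h t (by omega) (by omega)
      by_cases hq : bQmax levels ((iN : Int) + 1) (mid + 1) ≤ bound
      · rw [if_pos hq]
        exact ih mid hi (by omega) (by omega) h3 (by omega) (hcond.mp hq) h6
      · rw [if_neg hq]
        exact ih lo mid (by omega) (by omega) (by omega) (by omega) h5 (Or.inr (by rw [← hcond]; exact hq))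
    · rw [if_neg hbig]
      have hhi : hi = lo + 1 := by omega
      refine ⟨h1, by omega, h5, ?_⟩
      rcases h6 with h6 | h6
      · left; omega
      · right; rw [← hhi]; exact h6

theorem cnt_eq (k : Int) : ∀ (xs : List Int) (s : Int) (m : Nat),
    m ≤ xs.length →
    (∀ p : Nat, 1 ≤ p → p ≤ m → s + (xs.take p).sum ≤ k) →
    (m = xs.length ∨ k < s + (xs.take (m + 1)).sum) →
    cnt k xs s = (m : Int) := by
  intro xs
  induction xs with
  | nil =>
    intro s m h1 _ _
    simp at h1
    simp [cnt, h1]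
  | cons x xs ih =>
    intro s m h1 h2 h3
    match m with
    | 0 =>
      have hk : k < s + x := by
        rcases h3 with h3 | h3
        · simp at h3
        · simpa using h3
      simp [cnt, show ¬ (s + x ≤ k) by omega]
    | m + 1 =>
      have hx : s + x ≤ k := by simpa using h2 1 (by omega) (by omega)
      rw [cnt, if_pos hx, ih (s + x) m (by simpa using h1) ?pref ?last]
      · push_cast; ring
      case pref =>
        intro p hp1 hp2
        have := h2 (p + 1) (by omega) (by omega)
        rw [List.take_succ_cons, List.sum_cons] at this
        omega
      case last =>
        rcases h3 with h3 | h3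
        · left; simpa using h3
        · right
          rw [List.take_succ_cons, List.sum_cons] at h3
          omega

theorem levels_ok_init (list : List Int) :
    LevOK (bBuildP list) list.length (bLevels list.length (list.length + 1) [bBuildP list] 1) := by
  have h1 : (1 : Nat) = 2 ^ 0 := rfl
  rw [h1]
  apply bLevels_ok
  · rfl
  · omega
  · intro l hl
    have : l = 0 := by omega
    subst this
    constructor
    · simpa using bBuildP_length list
    · intro t _ X
      constructor
      · intro h u hu
        have : u = 0 := by omega
        subst this
        simpa using h
      · intro h
        simpa using h 0 (by omega)
  · omega

theorem per_start (list : List Int) (k : Int) (iN : Nat) (hin : iN < list.length) :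
    bSearch (bLevels list.length (list.length + 1) [bBuildP list] 1)
        (PySem.List.pyGetD (bBuildP list) (iN : Int) 0 + k) (iN : Int)
        (list.length + 2) (iN : Int) ((list.length : Int) + 1) - (iN : Int)
      = cnt k (list.drop iN) 0 := by
  set n := list.length with hn
  set PS := bBuildP list with hPS
  set levels := bLevels n (n + 1) [PS] 1 with hlevels
  have hlev : LevOK PS n levels := levels_ok_init list
  have hbound : PySem.List.pyGetD PS (iN : Int) 0 = (list.take iN).sum := by
    rw [PySem.List.pyGetD_natCast]
    exact bBuildP_getD list iN (by omega)
  set bound := PySem.List.pyGetD PS (iN : Int) 0 + k with hbd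
  have hspec := bSearch_spec PS n levels hlev iN hin bound (n + 2) (iN : Int) ((n : Int) + 1)
    (le_refl _) (by omega) (by omega) (by omega)
    (by intro t ht1 ht2; omega)
    (Or.inl rfl)
  set res := bSearch levels bound (iN : Int) (n + 2) (iN : Int) ((n : Int) + 1) with hres
  obtain ⟨hr1, hr2, hr3, hr4⟩ := hspec
  set resN := res.toNat with hresN
  have hrc : (resN : Int) = res := Int.toNat_of_nonneg (by omega)
  have hdropsum : ∀ p : Nat, ((list.drop iN).take p).sum = (list.take (iN + p)).sum - (list.take iN).sum := by
    intro p
    rw [List.take_add, List.sum_append]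
    ring
  have hm := cnt_eq k (list.drop iN) 0 (resN - iN) ?len ?pref ?last
  · rw [hm]
    omega
  case len =>
    rw [List.length_drop]
    omega
  case pref =>
    intro p hp1 hp2
    have hgood := hr3 (iN + p) (by omega) (by omega)
    have hPSt : PS.getD (iN + p) 0 = (list.take (iN + p)).sum :=
      bBuildP_getD list (iN + p) (by omega)
    rw [hPSt] at hgood
    rw [hdropsum p]
    rw [hbd, hbound] at hgood
    omega
  case last =>
    by_cases hend : resN = n
    · left
      rw [List.length_drop]
      omega
    · right
      have hbad : ¬ GoodUpTo PS bound iN (res + 1) := by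
        rcases hr4 with h | h
        · exfalso; omega
        · exact h
      unfold GoodUpTo at hbad
      push Not at hbad
      obtain ⟨t, ht1, ht2, ht3⟩ := hbad
      have htr : t = resN + 1 := by
        by_contra hne
        have : (t : Int) ≤ res := by omega
        exact absurd (hr3 t ht1 this) (by omega)
      subst htr
      have hPSt : PS.getD (resN + 1) 0 = (list.take (resN + 1)).sum :=
        bBuildP_getD list (resN + 1) (by omega)
      rw [hPSt, hbd, hbound] at ht3
      rw [hdropsum (resN - iN + 1)]
      have : iN + (resN - iN + 1) = resN + 1 := by omega
      rw [this]
      omega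

theorem Second_task_spec' (list : List Int) (k : Int) :
    Second_task list k = Second_task_alt list k := by
  rw [Second_task_eq_sum]
  show _ = Second_task_alt list k
  unfold Second_task_alt
  apply PySem.List.foldl_congr_mem
  intro acc i hi
  obtain ⟨h0, h1⟩ := (PySem.List.mem_pyRange_one).mp hi
  have hni : (i.toNat : Int) = i := Int.toNat_of_nonneg h0
  have hlt : i.toNat < list.length := by omega
  have := per_start list k i.toNat hlt
  rw [hni] at this
  rw [← this]

-- ===== VERDICT (by name: the statement is the Claim_ definition above) =====
theorem Second_task_spec : Claim_equal_Second_task := by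
  intro list k _
  unfold Spec_Second_task
  exact Second_task_spec' list k
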